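-- pv_equiv track=rewrite | github.com/knogu/tmp-verilog | test.py | collect_status
-- ===== SOURCE A (Python) =====
-- def collect_status(result: list):
--     all_states = []
--     cur_state: dict = {}
--     for line in result:
--         if "===" in line:
--             all_states.append(cur_state)
--             cur_state = {}
--             continue
--         if ":" in line and not "cpu.v" in line:
--             label, val = line.split(":")
--             cur_state[label] = int(val)
--     return all_states
-- ===== SOURCE B (Python) =====
-- def collect_status(result: list):
--     # Right-to-left pass: a '===' line opens a new group at the front; an ordinary
--     # line joins the current front group (lines after the last '===' have no group
--     # and are dropped naturally).  Then parse each group into a dict.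
--     groups = []
--     for line in reversed(result):
--         if "===" in line:
--             groups.insert(0, [])
--         elif groups:
--             groups[0].insert(0, line)
--     return [_parse(g) for g in groups]
--
-- def _parse(lines):
--     d = {}
--     for line in lines:
--         if ":" in line and "cpu.v" not in line:
--             label, val = line.split(":")
--             d[label] = int(val)
--     return d
-- ===== Notes on version B (the rewrite author's own statement) =====
-- stated objective: alternative
-- what changed: B traverses the lines right-to-left, so a '===' line opens a new group and trailing lines are dropped with no special case, then maps a segment parser over the groups; A is a single forward pass threading a mutable current dict flushed at each '===' line.
import Mathlib
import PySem

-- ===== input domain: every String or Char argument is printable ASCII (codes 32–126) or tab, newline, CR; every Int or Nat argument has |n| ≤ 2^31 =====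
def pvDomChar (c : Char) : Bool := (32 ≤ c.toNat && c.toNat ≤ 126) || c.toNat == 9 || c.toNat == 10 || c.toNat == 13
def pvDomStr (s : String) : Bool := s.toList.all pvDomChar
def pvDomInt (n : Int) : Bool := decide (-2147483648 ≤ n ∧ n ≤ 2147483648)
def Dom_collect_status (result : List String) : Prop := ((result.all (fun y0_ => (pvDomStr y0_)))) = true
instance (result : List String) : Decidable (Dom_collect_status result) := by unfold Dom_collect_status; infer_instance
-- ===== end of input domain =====

-- B scans the lines right-to-left (a '===' line opens a new group, trailing lines drop out
-- naturally) and then parses each group; A is a forward pass flushing a mutable dict. Same values.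

-- shared inner parse step: Python's `if ":" in line and not "cpu.v" in line: label, val = line.split(":"); d[label] = int(val)`
-- (both sources contain these exact lines; where Python would raise ValueError — excluded by Pre_ — the dict is left unchanged)
def pvParseLine (d : PySem.Dict String Int) (line : String) : PySem.Dict String Int :=
  if PySem.Str.isIn ":" line && !(PySem.Str.isIn "cpu.v" line) then
    match PySem.Str.split? line ":" with
    | some [label, val] =>
      match PySem.Int.ofStr? val with
      | some v => d.insert label v
      | none => d          -- Python: ValueError from int(val); outside Pre_
    | _ => d               -- Python: ValueError from unpacking; outside Pre_ (split? is some: sep ≠ "")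
  else d

-- ===== PORT A =====
def pvAStep (st : List (List (String × Int)) × PySem.Dict String Int) (line : String) :
    List (List (String × Int)) × PySem.Dict String Int :=
  if PySem.Str.isIn "===" line then (st.1 ++ [st.2.items], PySem.Dict.empty)
  else (st.1, pvParseLine st.2 line)

def collect_status (result : List String) : List (List (String × Int)) :=
  (result.foldl pvAStep ([], PySem.Dict.empty)).1

-- ===== PORT B =====
-- `for line in reversed(result)`: a fold over result.reverse; groups.insert(0, …) prepends
def pvRevStep (gs : List (List String)) (line : String) : List (List String) :=
  if PySem.Str.isIn "===" line then [] :: gs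
  else
    match gs with
    | [] => gs                       -- `elif groups:` false: line dropped
    | g :: rest => (line :: g) :: rest

def pvParse (lines : List String) : List (String × Int) :=
  (lines.foldl pvParseLine PySem.Dict.empty).items

def collect_status_alt (result : List String) : List (List (String × Int)) :=
  (result.reverse.foldl pvRevStep []).map pvParse

-- ===== PRECONDITION & SPEC =====
-- a line is ok when Python's body cannot raise on it: either it is a delimiter, or it is not a
-- parse line, or it splits into exactly two pieces whose value part parses as an int
def pvLineOk (l : String) : Bool :=
  PySem.Str.isIn "===" l ||
  !(PySem.Str.isIn ":" l && !(PySem.Str.isIn "cpu.v" l)) ||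
  (match PySem.Str.split? l ":" with
   | some [_, val] => (PySem.Int.ofStr? val).isSome
   | _ => false)

-- Pre_ excludes exactly the inputs where A raises ValueError (a parse line with more than one ':' or a non-int value)
def Pre_collect_status (result : List String) : Prop := ∀ l ∈ result, pvLineOk l = true
instance (result : List String) : Decidable (Pre_collect_status result) := by
  unfold Pre_collect_status; infer_instance

def pvWitness_collect_status : List String := ["a:1", "cpu.v:9", "===", "b: 7 "]

def Spec_collect_status (result : List String) (out : List (List (String × Int))) : Prop :=
  out = collect_status_alt result
instance (result : List String) (out : List (List (String × Int))) : Decidable (Spec_collect_status result out) := by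
  unfold Spec_collect_status; infer_instance

-- ===== CLAIM =====
def Claim_equal_collect_status : Prop :=
  ∀ (result : List String), Dom_collect_status result → Pre_collect_status result →
    Spec_collect_status result (collect_status result)

-- ===== LEMMAS AND PROOFS =====

-- recursive description of A's flushed-dict sequence
def pvSpecRun : List String → PySem.Dict String Int → List (List (String × Int))
  | [], _ => []
  | l :: ls, d =>
    if PySem.Str.isIn "===" l then d.items :: pvSpecRun ls PySem.Dict.empty
    else pvSpecRun ls (pvParseLine d l)

theorem pvA_run (ls : List String) (acc : List (List (String × Int))) (d : PySem.Dict String Int) :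
    (ls.foldl pvAStep (acc, d)).1 = acc ++ pvSpecRun ls d := by
  induction ls generalizing acc d with
  | nil => simp [pvSpecRun]
  | cons l ls ih =>
    simp only [List.foldl_cons, pvAStep, pvSpecRun]
    by_cases h : PySem.Str.isIn "===" l = true
    · rw [if_pos h, if_pos h, ih]; simp
    · rw [if_neg h, if_neg h, ih]

-- recursive description of B's delimiter-terminated groups
def pvGroups : List String → List (List String)
  | [] => []
  | l :: ls =>
    if PySem.Str.isIn "===" l then [] :: pvGroups ls
    else
      match pvGroups ls with
      | [] => []
      | g :: gs => (l :: g) :: gs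

theorem pvB_groups (ls : List String) :
    ls.reverse.foldl pvRevStep [] = pvGroups ls := by
  rw [List.foldl_reverse]
  induction ls with
  | nil => rfl
  | cons l ls ih =>
    simp only [List.foldr_cons]
    rw [ih]
    simp only [pvRevStep, pvGroups]
    by_cases h : PySem.Str.isIn "===" l = true
    · rw [if_pos h, if_pos h]
    · rw [if_neg h, if_neg h]
      cases pvGroups ls <;> rfl

theorem pvRun_groups (ls : List String) (d : PySem.Dict String Int) :
    pvSpecRun ls d =
      match pvGroups ls with
      | [] => []
      | g :: gs => (g.foldl pvParseLine d).items :: gs.map pvParse := by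
  induction ls generalizing d with
  | nil => simp [pvSpecRun, pvGroups]
  | cons l ls ih =>
    simp only [pvSpecRun, pvGroups]
    by_cases h : PySem.Str.isIn "===" l = true
    · rw [if_pos h, if_pos h, ih PySem.Dict.empty]
      cases hg : pvGroups ls with
      | nil => simp [List.foldl_nil]
      | cons g gs => simp [pvParse]
    · rw [if_neg h, if_neg h, ih (pvParseLine d l)]
      cases hg : pvGroups ls with
      | nil => rfl
      | cons g gs => simp [List.foldl_cons]

-- ===== VERDICT =====
theorem collect_status_spec : Claim_equal_collect_status := by
  intro result _ _
  unfold Spec_collect_status collect_status collect_status_alt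
  rw [pvA_run, pvB_groups, pvRun_groups]
  simp only [List.nil_append]
  cases hg : pvGroups result with
  | nil => rfl
  | cons g gs => simp [pvParse]
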